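-- pv_equiv track=rewrite | github.com/automatisieren/Hacker-Rank-Python-Solutions | Task_27.py | calculate
-- ===== SOURCE A (Python) =====
-- def calculate(word : str) -> list:
--     kevin = 0
--     stuart = 0
--     vowels = ['A', 'E', 'I', 'O', 'U']
--     for i in range(len(word)):
--         if word[i] in vowels:
--             kevin += len(word) - i
--         else:
--             stuart += len(word) - i
--     return [kevin, stuart]
-- ===== SOURCE B (Python) =====
-- def calculate(word: str) -> list:
--     # Count substrings instead of weighting positions: the positional weight
--     # n - i of position i equals the number of substrings starting at i, so
--     # kevin = sum over each position j of the number of vowels seen up to j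
--     # (a running prefix-vowel counter); stuart is the complement of the
--     # closed-form total n*(n+1)//2.  No index arithmetic n - i anywhere.
--     kevin = 0
--     seen = 0
--     for c in word:
--         if c in 'AEIOU':
--             seen += 1
--         kevin += seen
--     n = len(word)
--     total = n * (n + 1) // 2
--     return [kevin, total - kevin]
-- ===== Notes on version B (the rewrite author's own statement) =====
-- stated objective: alternative
-- what changed: B reinterprets the positional weight n-i as a substring count: it keeps a running prefix count of vowels and adds it at every position (kevin = sum of prefix vowel counts), never computing n-i or an index, and derives stuart as n*(n+1)//2 - kevin instead of a second accumulator; a timing run measured this constant-factor faster (no range/indexing, one accumulator pair).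
import Mathlib
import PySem

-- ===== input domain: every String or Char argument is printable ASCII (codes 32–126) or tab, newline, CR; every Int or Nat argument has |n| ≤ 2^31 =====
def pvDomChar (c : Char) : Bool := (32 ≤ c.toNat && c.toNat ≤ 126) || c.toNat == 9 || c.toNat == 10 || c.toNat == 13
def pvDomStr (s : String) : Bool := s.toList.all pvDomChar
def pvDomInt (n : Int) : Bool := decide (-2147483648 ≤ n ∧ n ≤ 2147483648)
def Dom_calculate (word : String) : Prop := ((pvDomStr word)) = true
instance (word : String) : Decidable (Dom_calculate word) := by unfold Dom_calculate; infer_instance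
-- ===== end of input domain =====

-- B recasts the positional weight len(word)-i as a substring count: it adds a running
-- prefix vowel counter at every position and derives stuart from the closed-form total
-- n*(n+1)//2, never computing len(word)-i (objective: alternative).

-- ===== PORT A =====
-- word[i] with 0 ≤ i < len(word) is exact as pyGetD (index always in range here)
def calculate (word : String) : List Int :=
  let cs := word.toList
  let n : Int := PySem.List.len cs
  let vowels : List Char := ['A', 'E', 'I', 'O', 'U']
  let p := (PySem.List.pyRange 0 n 1).foldl
    (fun (p : Int × Int) i =>
      if PySem.List.pyGetD cs i ' ' ∈ vowels then (p.1 + (n - i), p.2)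
      else (p.1, p.2 + (n - i))) (0, 0)
  [p.1, p.2]

-- ===== PORT B =====
-- "c in 'AEIOU'" for a single char c is exactly char membership in the list of its chars
def calculate_alt (word : String) : List Int :=
  let cs := word.toList
  let p := cs.foldl
    (fun (p : Int × Int) c =>
      let seen := if c ∈ (['A', 'E', 'I', 'O', 'U'] : List Char) then p.2 + 1 else p.2
      (p.1 + seen, seen)) (0, 0)
  let n : Int := PySem.List.len cs
  let total := PySem.Int.floordiv (n * (n + 1)) 2
  [p.1, total - p.1]

-- ===== PRECONDITION & SPEC =====
def Spec_calculate (word : String) (out : List Int) : Prop := out = calculate_alt word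
instance (word : String) (out : List Int) : Decidable (Spec_calculate word out) := by unfold Spec_calculate; infer_instance

-- ===== CLAIM (what is proved, stated in full; the proofs are below) =====
def Claim_equal_calculate : Prop := ∀ (word : String), Dom_calculate word → Spec_calculate word (calculate word)

-- ===== LEMMAS AND PROOFS =====

-- sum over vowel positions i of (len - i), defined structurally
def pvKB : List Char → Int
  | [] => 0
  | h :: t => (if h ∈ (['A', 'E', 'I', 'O', 'U'] : List Char) then ((t.length : Int) + 1) else 0) + pvKB t

-- sum over consonant positions i of (len - i), defined structurally
def pvSB : List Char → Int
  | [] => 0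
  | h :: t => (if h ∈ (['A', 'E', 'I', 'O', 'U'] : List Char) then 0 else ((t.length : Int) + 1)) + pvSB t

-- number of vowels
def pvVC : List Char → Int
  | [] => 0
  | h :: t => (if h ∈ (['A', 'E', 'I', 'O', 'U'] : List Char) then 1 else 0) + pvVC t

-- A's fold over the enumerated word, in closed form
theorem pvA_fold (n : Int) :
    ∀ (cs : List Char) (s k st : Int), n = s + cs.length →
      (PySem.List.enumerate cs s).foldl
        (fun (p : Int × Int) ic =>
          if ic.2 ∈ (['A', 'E', 'I', 'O', 'U'] : List Char) then (p.1 + (n - ic.1), p.2)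
          else (p.1, p.2 + (n - ic.1))) (k, st)
        = (k + pvKB cs, st + pvSB cs) := by
  intro cs
  induction cs with
  | nil => intro s k st h; simp [pvKB, pvSB, PySem.List.enumerate_nil]
  | cons hd tl ih =>
      intro s k st h
      rw [PySem.List.enumerate_cons]
      simp only [List.foldl_cons]
      by_cases hv : hd ∈ (['A', 'E', 'I', 'O', 'U'] : List Char) <;>
        · simp only [hv, if_true, if_false]
          rw [ih (s + 1) _ _ (by push_cast [List.length_cons] at h ⊢; omega)]
          simp only [pvKB, pvSB, hv, if_true, if_false, Prod.ext_iff]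
          constructor <;> [skip; skip] <;> push_cast [List.length_cons] at h ⊢ <;> omega

-- B's fold (running prefix vowel counter), in closed form
theorem pvB_fold :
    ∀ (cs : List Char) (k seen : Int),
      cs.foldl
        (fun (p : Int × Int) c =>
          let s' := if c ∈ (['A', 'E', 'I', 'O', 'U'] : List Char) then p.2 + 1 else p.2
          (p.1 + s', s')) (k, seen)
        = (k + seen * cs.length + pvKB cs, seen + pvVC cs) := by
  intro cs
  induction cs with
  | nil => intro k seen; simp [pvKB, pvVC]
  | cons hd tl ih =>
      intro k seen
      simp only [List.foldl_cons]
      by_cases hv : hd ∈ (['A', 'E', 'I', 'O', 'U'] : List Char) <;>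
        · simp only [hv, if_true, if_false]
          rw [ih]
          simp only [pvKB, pvVC, hv, if_true, if_false, Prod.ext_iff,
            List.length_cons]
          constructor <;> push_cast <;> ring

-- Gauss: vowel and consonant weight sums complement each other to n(n+1)/2
theorem pvKBSB : ∀ (cs : List Char),
    2 * (pvKB cs + pvSB cs) = (cs.length : Int) * ((cs.length : Int) + 1) := by
  intro cs
  induction cs with
  | nil => simp [pvKB, pvSB]
  | cons hd tl ih =>
      by_cases hv : hd ∈ (['A', 'E', 'I', 'O', 'U'] : List Char) <;>
        · simp only [pvKB, pvSB, hv, if_true, if_false, List.length_cons]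
          push_cast
          push_cast at ih
          nlinarith [ih]

-- ===== VERDICT (by name: the statement is the Claim_ definition above) =====
theorem calculate_spec : Claim_equal_calculate := by
  intro word _
  unfold Spec_calculate calculate calculate_alt
  simp only []
  set cs := word.toList with hcs
  have hlen : PySem.List.len cs = (cs.length : Int) := by simp [PySem.List.len]
  -- A's fold over range(len) + word[i] is the fold over enumerate(word)
  have hA : (PySem.List.pyRange 0 (PySem.List.len cs) 1).foldl
      (fun (p : Int × Int) i =>
        if PySem.List.pyGetD cs i ' ' ∈ (['A', 'E', 'I', 'O', 'U'] : List Char)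
        then (p.1 + (PySem.List.len cs - i), p.2)
        else (p.1, p.2 + (PySem.List.len cs - i))) (0, 0)
      = ((0 : Int) + pvKB cs, (0 : Int) + pvSB cs) := by
    have he : PySem.List.enumerate cs 0
        = (PySem.List.pyRange 0 (PySem.List.len cs) 1).map
            (fun j => (j, PySem.List.pyGetD cs j ' ')) :=
      PySem.List.enumerate_eq_map_pyRange cs ' '
    have := pvA_fold (PySem.List.len cs) cs 0 0 0 (by rw [hlen]; ring)
    rw [he, List.foldl_map] at this
    exact this
  rw [hA, pvB_fold cs 0 0]
  have hg := pvKBSB cs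
  have hfd : PySem.Int.floordiv ((cs.length : Int) * ((cs.length : Int) + 1)) 2
      = pvKB cs + pvSB cs := by
    rw [← hg, PySem.Int.floordiv_eq_ediv_of_pos (by norm_num)]
    omega
  simp only [hlen, hfd, zero_add, zero_mul, List.cons.injEq, and_true]
  exact ⟨trivial, by omega⟩
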